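-- pv_equiv track=rewrite | github.com/parttee/tira2020 | week4/fliptwo.py | solve
-- ===== SOURCE A (Python) =====
-- from collections import deque
--
-- def solve(n, k):
--     q = deque([i for i in range(1, n + 1)])
--
--     for _ in range(k):
--         fst = q.popleft()
--         snd = q.popleft()
--         q.append(snd)
--         q.append(fst)
--
--     return q[0]
-- ===== SOURCE B (Python) =====
-- def solve(n, k):
--     # Closed form: the front element is periodic in the number of ops.
--     steps = max(k, 0)  # non-positive k performs no operations
--     if n % 2 == 1:
--         return 2 * (steps % ((n + 1) // 2)) + 1
--     r = steps % n
--     h = n // 2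
--     return 2 * r + 1 if r < h else 2 * (r - h) + 2
-- ===== Notes on version B (the rewrite author's own statement) =====
-- stated objective: faster
-- what changed: Replaced the k-step deque simulation by an O(1) closed form: the front element after k pair-swap-to-back ops is periodic in k with period (n+1)//2 for odd n and n for even n, so B computes it directly from k mod the period.
import Mathlib
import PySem

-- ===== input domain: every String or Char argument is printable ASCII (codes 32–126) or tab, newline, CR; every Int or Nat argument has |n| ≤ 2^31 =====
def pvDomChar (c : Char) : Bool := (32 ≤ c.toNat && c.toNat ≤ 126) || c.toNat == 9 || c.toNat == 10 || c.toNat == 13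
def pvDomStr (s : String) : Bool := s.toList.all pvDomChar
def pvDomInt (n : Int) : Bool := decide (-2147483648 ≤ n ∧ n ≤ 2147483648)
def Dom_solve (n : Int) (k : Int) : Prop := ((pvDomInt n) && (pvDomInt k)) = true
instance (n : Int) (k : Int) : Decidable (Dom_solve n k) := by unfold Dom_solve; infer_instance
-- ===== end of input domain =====

-- B replaces A's O(k) deque simulation by an O(1) closed form (front element is periodic in k).

-- ===== PORT A =====
-- one loop body: fst = popleft; snd = popleft; append snd; append fst
-- (the underscore branch is the popleft-on-too-short-deque case, which raises in Python; excluded by Pre_)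
def solveStep (q : List Int) : List Int :=
  match q with
  | fst :: snd :: rest => rest ++ [snd, fst]
  | q => q

def solve (n : Int) (k : Int) : Int :=
  let q := (PySem.List.pyRange 0 k 1).foldl (fun q _ => solveStep q) (PySem.List.pyRange 1 (n + 1) 1)
  (PySem.List.pyGet? q 0).getD 0   -- q[0]; none (IndexError) excluded by Pre_

-- ===== PORT B =====
def solve_alt (n : Int) (k : Int) : Int :=
  let steps := max k 0
  if PySem.Int.mod n 2 = 1 then
    2 * PySem.Int.mod steps (PySem.Int.floordiv (n + 1) 2) + 1
  else
    let r := PySem.Int.mod steps n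
    let h := PySem.Int.floordiv n 2
    if r < h then 2 * r + 1 else 2 * (r - h) + 2

-- ===== PRECONDITION & SPEC =====
-- Pre_ excludes exactly the inputs where A raises IndexError: an empty deque (n < 1),
-- or fewer than two elements while at least one swap is performed (n = 1 with k ≥ 1).
def Pre_solve (n : Int) (k : Int) : Prop := 1 ≤ n ∧ (k ≤ 0 ∨ 2 ≤ n)
instance (n : Int) (k : Int) : Decidable (Pre_solve n k) := by unfold Pre_solve; infer_instance
def pvWitness_solve : Int × Int := (4, 5)

def Spec_solve (n : Int) (k : Int) (out : Int) : Prop := out = solve_alt n k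
instance (n : Int) (k : Int) (out : Int) : Decidable (Spec_solve n k out) := by unfold Spec_solve; infer_instance

-- ===== CLAIM (what is proved, stated in full; the proofs are below) =====
def Claim_equal_solve : Prop := ∀ (n : Int) (k : Int), Dom_solve n k → Pre_solve n k → Spec_solve n k (solve n k)

-- ===== LEMMAS AND PROOFS =====

-- "flip within a pair": even index ↦ +1, odd index ↦ -1
def pvFlip (m : Nat) : Nat := if m % 2 = 0 then m + 1 else m - 1

-- the infinite stream of queue contents: positions 0..n-1 hold 1..n, and position m ≥ n
-- holds the element of the pair-swapped position pvFlip (m - n)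
def pvS (n : Nat) (m : Nat) : Int :=
  if h : m < n ∨ n < 2 then (m : Int) + 1 else pvS n (pvFlip (m - n))
termination_by m
decreasing_by
  unfold pvFlip
  split <;> omega

lemma pvS_lt (n m : Nat) (h : m < n) : pvS n m = (m : Int) + 1 := by
  rw [pvS, dif_pos (Or.inl h)]

lemma pvS_wrap_even (n t : Nat) (hn : 2 ≤ n) : pvS n (2 * t + n) = pvS n (2 * t + 1) := by
  rw [pvS, dif_neg (by omega)]
  congr 1
  unfold pvFlip
  split <;> omega

lemma pvS_wrap_odd (n t : Nat) (hn : 2 ≤ n) : pvS n (2 * t + n + 1) = pvS n (2 * t) := by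
  rw [pvS, dif_neg (by omega)]
  congr 1
  unfold pvFlip
  split <;> omega

lemma pv_foldl_const {α β : Type} (f : α → α) : ∀ (l : List β) (q : α),
    l.foldl (fun q _ => f q) q = f^[l.length] q := by
  intro l
  induction l with
  | nil => intro q; simp
  | cons x xs ih =>
      intro q
      simp [List.foldl_cons, ih, Function.iterate_succ_apply]

lemma pv_iterate (n : Nat) (hn : 2 ≤ n) : ∀ t : Nat,
    solveStep^[t] ((List.range n).map (fun i => pvS n i)) =
      (List.range n).map (fun i => pvS n (2 * t + i)) := by
  intro t
  induction t with
  | zero => simp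
  | succ t ih =>
      rw [Function.iterate_succ_apply', ih]
      obtain ⟨m, rfl⟩ : ∃ m, n = m + 2 := ⟨n - 2, by omega⟩
      have hsrc : (List.range (m + 2)).map (fun i => pvS (m + 2) (2 * t + i)) =
          pvS (m + 2) (2 * t + 0) :: pvS (m + 2) (2 * t + 1) ::
            (List.range m).map (fun i => pvS (m + 2) (2 * t + (i + 1 + 1))) := by
        rw [List.range_succ_eq_map, List.range_succ_eq_map]
        simp [List.map_map, Function.comp]
      rw [hsrc]
      show (List.range m).map (fun i => pvS (m + 2) (2 * t + (i + 1 + 1))) ++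
          [pvS (m + 2) (2 * t + 1), pvS (m + 2) (2 * t + 0)] = _
      have htgt : (List.range (m + 2)).map (fun i => pvS (m + 2) (2 * (t + 1) + i)) =
          ((List.range m).map (fun i => pvS (m + 2) (2 * (t + 1) + i)) ++
            [pvS (m + 2) (2 * (t + 1) + m)]) ++ [pvS (m + 2) (2 * (t + 1) + (m + 1))] := by
        rw [List.range_succ, List.range_succ]
        simp
      rw [htgt]
      have h1 : (List.range m).map (fun i => pvS (m + 2) (2 * t + (i + 1 + 1))) =
          (List.range m).map (fun i => pvS (m + 2) (2 * (t + 1) + i)) :=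
        List.map_congr_left (by intro a _; congr 1; omega)
      have h2 : pvS (m + 2) (2 * (t + 1) + m) = pvS (m + 2) (2 * t + 1) := by
        have := pvS_wrap_even (m + 2) t (by omega)
        rw [show 2 * (t + 1) + m = 2 * t + (m + 2) by omega]
        exact this
      have h3 : pvS (m + 2) (2 * (t + 1) + (m + 1)) = pvS (m + 2) (2 * t + 0) := by
        have := pvS_wrap_odd (m + 2) t (by omega)
        rw [show 2 * (t + 1) + (m + 1) = 2 * t + (m + 2) + 1 by omega]
        rw [this]
        norm_num
      rw [h1, h2, h3]
      simp

lemma pvS_odd (n : Nat) (hn : 2 ≤ n) (ho : n % 2 = 1) : ∀ t : Nat,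
    pvS n (2 * t) = 2 * ((t % ((n + 1) / 2) : Nat) : Int) + 1 := by
  intro t
  induction t using Nat.strong_induction_on with
  | _ t ih =>
    by_cases h : 2 * t < n
    · rw [pvS_lt n (2 * t) h, Nat.mod_eq_of_lt (by omega)]
      push_cast; ring
    · rw [pvS, dif_neg (by omega)]
      have hL : 1 ≤ (n + 1) / 2 := by omega
      have hflip : pvFlip (2 * t - n) = 2 * (t - (n + 1) / 2) := by
        unfold pvFlip; split <;> omega
      rw [hflip, ih (t - (n + 1) / 2) (by omega)]
      have : (t - (n + 1) / 2) % ((n + 1) / 2) = t % ((n + 1) / 2) := by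
        conv_rhs => rw [show t = (t - (n + 1) / 2) + (n + 1) / 2 by omega]
        rw [Nat.add_mod_right]
      rw [this]

lemma pvS_even (n : Nat) (hn : 2 ≤ n) (he : n % 2 = 0) : ∀ t : Nat,
    pvS n (2 * t) = if t % n < n / 2 then 2 * ((t % n : Nat) : Int) + 1
      else 2 * ((t % n - n / 2 : Nat) : Int) + 2 := by
  intro t
  induction t using Nat.strong_induction_on with
  | _ t ih =>
    by_cases h : 2 * t < n
    · rw [pvS_lt n (2 * t) h, Nat.mod_eq_of_lt (by omega), if_pos (by omega)]
      push_cast; ring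
    · rw [pvS, dif_neg (by omega)]
      have hflip : pvFlip (2 * t - n) = 2 * t - n + 1 := by
        unfold pvFlip; split <;> omega
      rw [hflip]
      by_cases h2 : 2 * t - n + 1 < n
      · rw [pvS_lt n _ h2]
        have ht : t < n := by omega
        rw [Nat.mod_eq_of_lt ht, if_neg (by omega)]
        push_cast
        omega
      · rw [pvS, dif_neg (by omega)]
        have hflip2 : pvFlip (2 * t - n + 1 - n) = 2 * (t - n) := by
          unfold pvFlip; split <;> omega
        rw [hflip2, ih (t - n) (by omega)]
        have : (t - n) % n = t % n := by
          conv_rhs => rw [show t = (t - n) + n by omega]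
          rw [Nat.add_mod_right]
        rw [this]

lemma pv_init (n : Nat) : PySem.List.pyRange 1 ((n : Int) + 1) 1 =
    (List.range n).map (fun i => pvS n i) := by
  rw [PySem.List.pyRange_one]
  rw [show ((n : Int) + 1 - 1).toNat = n by omega]
  refine List.map_congr_left ?_
  intro a ha
  rw [List.mem_range] at ha
  rw [pvS_lt n a ha]
  ring

-- ===== VERDICT (by name: the statement is the Claim_ definition above) =====
theorem solve_spec : Claim_equal_solve := by
  intro n k _ hpre
  obtain ⟨hn1, hk⟩ := hpre
  unfold Spec_solve solve solve_alt
  by_cases hn2 : 2 ≤ n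
  · -- n ≥ 2 : full machinery
    obtain ⟨N, rfl⟩ : ∃ N : Nat, n = (N : Int) := ⟨n.toNat, by omega⟩
    have hN : 2 ≤ N := by exact_mod_cast hn2
    set s : Nat := k.toNat with hs
    have hlen : (PySem.List.pyRange 0 k 1).length = s := by
      rw [PySem.List.length_pyRange_one]; omega
    rw [pv_foldl_const, hlen, pv_init, pv_iterate N hN s]
    have hget : (PySem.List.pyGet? ((List.range N).map (fun i => pvS N (2 * s + i))) 0).getD 0
        = pvS N (2 * s) := by
      obtain ⟨M, rfl⟩ : ∃ M, N = M + 1 := ⟨N - 1, by omega⟩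
      rw [List.range_succ_eq_map]
      simp [PySem.List.pyGet?, PySem.List.pyIdx?]
    rw [hget]
    have hmax : max k 0 = ((s : Nat) : Int) := by omega
    rw [hmax]
    by_cases ho : N % 2 = 1
    · rw [if_pos (by
        rw [show ((N : Int)) = ((N : Nat) : Int) from rfl]
        rw [show (2 : Int) = ((2 : Nat) : Int) from rfl, PySem.Int.mod_natCast]
        omega)]
      rw [pvS_odd N hN ho s]
      rw [show ((N : Int) + 1) = (((N + 1 : Nat)) : Int) by push_cast; ring]
      rw [show (2 : Int) = ((2 : Nat) : Int) from rfl, PySem.Int.floordiv_natCast,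
        PySem.Int.mod_natCast]
    · rw [if_neg (by
        rw [show ((N : Int)) = ((N : Nat) : Int) from rfl]
        rw [show (2 : Int) = ((2 : Nat) : Int) from rfl, PySem.Int.mod_natCast]
        omega)]
      rw [pvS_even N hN (by omega) s]
      rw [show (2 : Int) = ((2 : Nat) : Int) from rfl, PySem.Int.floordiv_natCast,
        PySem.Int.mod_natCast]
      by_cases hc : s % N < N / 2
      · rw [if_pos (by exact_mod_cast hc), if_pos (by exact_mod_cast hc)]
      · rw [if_neg (by exact_mod_cast hc), if_neg (by exact_mod_cast hc)]
        have : ((s % N : Nat) : Int) - ((N / 2 : Nat) : Int) = ((s % N - N / 2 : Nat) : Int) := by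
          omega
        rw [this]
  · -- n = 1 and k ≤ 0 : zero operations, both sides are 1
    have hn : n = 1 := by omega
    have hk0 : k ≤ 0 := by omega
    subst hn
    rw [PySem.List.pyRange_one_eq_nil hk0]
    simp only [List.foldl_nil]
    have h1 : PySem.List.pyRange 1 (1 + 1) 1 = [1] := PySem.List.pyRange_one_singleton 1
    rw [h1]
    have hmax : max k 0 = 0 := by omega
    rw [hmax]
    decide
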